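-- pv_equiv track=rewrite | github.com/heitzes/Algorithm | 프로그래머스/lv2/42584. 주식가격/주식가격.py | solution
-- ===== SOURCE A (Python) =====
-- def solution(prices):
--     answer, stack = [0], [[prices.pop(), 0]]
--     while prices:
--         ppop = prices.pop()
--         val = 0
--         while stack:
--             if ppop > stack[-1][0]:
--                 break
--             val += stack[-1][1]
--             stack.pop()
--         answer.append(val+1)
--         stack.append([ppop, val+1])
--     return answer[::-1]
-- ===== SOURCE B (Python) =====
-- def solution(prices):
--     answer = []
--     while True:
--         p = prices.pop(0)
--         val = 0
--         for q in prices: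
--             val += 1
--             if q < p:
--                 break
--         answer.append(val)
--         if not prices:
--             return answer
-- ===== Notes on version B (the rewrite author's own statement) =====
-- stated objective: simpler
-- what changed: Replaces A's reversed traversal with a monotonic stack of (price, seconds) pairs by a plain front-to-back scan that, for each popped front element, counts the following elements until one is strictly smaller.
import Mathlib
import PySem

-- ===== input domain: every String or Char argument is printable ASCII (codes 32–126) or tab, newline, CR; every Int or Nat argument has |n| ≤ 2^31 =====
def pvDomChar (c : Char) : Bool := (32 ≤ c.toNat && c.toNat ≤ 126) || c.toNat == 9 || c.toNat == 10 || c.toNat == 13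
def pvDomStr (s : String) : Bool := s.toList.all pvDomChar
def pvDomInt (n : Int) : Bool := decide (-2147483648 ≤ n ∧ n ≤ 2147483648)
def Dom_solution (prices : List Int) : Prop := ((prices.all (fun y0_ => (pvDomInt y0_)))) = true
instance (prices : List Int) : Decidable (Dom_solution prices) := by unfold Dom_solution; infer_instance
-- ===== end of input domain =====

-- B replaces A's back-to-front monotonic-stack pass with a plain front-to-back O(n²) scan
-- (simpler); both Pythons empty `prices` in place and raise IndexError on []; equivalence
-- claimed about the return value only.

-- ===== PORT A =====
-- inner `while stack:` loop: accumulate popped counters into val, return (val, remaining stack);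
-- stack is kept top-at-head.
def solPopA (ppop : Int) (stack : List (Int × Int)) (val : Int) : Int × List (Int × Int) :=
  match stack with
  | [] => (val, [])
  | (q, c) :: rest =>
    if ppop > q then (val, (q, c) :: rest)
    else solPopA ppop rest (val + c)

-- outer `while prices:` loop, consuming the reversed list (Python pops from the end)
def solLoopA (rest : List Int) (stack : List (Int × Int)) (answer : List Int) : List Int :=
  match rest with
  | [] => answer.reverse            -- `return answer[::-1]`
  | ppop :: rs =>
    let (val, stack') := solPopA ppop stack 0
    solLoopA rs ((ppop, val + 1) :: stack') (answer ++ [val + 1])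

def solution (prices : List Int) : List Int :=
  match prices.reverse with
  | [] => []                        -- Python raises IndexError here; excluded by Pre_solution
  | p0 :: rest => solLoopA rest [(p0, 0)] [0]

-- ===== PORT B =====
-- `for q in prices: val += 1; if q < p: break`
def solCountB (p : Int) (l : List Int) : Int :=
  match l with
  | [] => 0
  | q :: t => if q < p then 1 else 1 + solCountB p t

-- `while True:` loop with `p = prices.pop(0)` and `if not prices: return answer`
def solLoopB (prices : List Int) (answer : List Int) : List Int :=
  match prices with
  | [] => answer                    -- Python raises IndexError here; excluded by Pre_solution
  | p :: rest =>
    let val := solCountB p rest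
    if rest = [] then answer ++ [val] else solLoopB rest (answer ++ [val])

def solution_alt (prices : List Int) : List Int := solLoopB prices []

-- ===== PRECONDITION & SPEC =====
-- A (and B) raise IndexError on the empty list (pop from empty list); nothing else is excluded.
def Pre_solution (prices : List Int) : Prop := prices ≠ []
instance (prices : List Int) : Decidable (Pre_solution prices) := by unfold Pre_solution; infer_instance
def pvWitness_solution : List Int := ([1, 2, 3, 2, 3])

def Spec_solution (prices : List Int) (out : List Int) : Prop := out = solution_alt prices
instance (prices : List Int) (out : List Int) : Decidable (Spec_solution prices out) := by unfold Spec_solution; infer_instance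

-- ===== CLAIM (what is proved, stated in full; the proofs are below) =====
def Claim_equal_solution : Prop := ∀ (prices : List Int), Dom_solution prices → Pre_solution prices → Spec_solution prices (solution prices)

-- ===== LEMMAS AND PROOFS =====

-- the common specification: each element's count over its tail
def solNaive : List Int → List Int
  | [] => []
  | p :: rest => solCountB p rest :: solNaive rest

-- B's loop appends solNaive
theorem solLoopB_eq (prices answer : List Int) (h : prices ≠ []) :
    solLoopB prices answer = answer ++ solNaive prices := by
  induction prices generalizing answer with
  | nil => exact absurd rfl h
  | cons p rest ih =>
    simp only [solLoopB, solNaive]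
    by_cases hr : rest = []
    · subst hr; simp [solNaive]
    · rw [if_neg hr, ih _ hr]
      simp

-- the value accumulator of solPopA is additive
theorem solPopA_val (p : Int) (st : List (Int × Int)) (v : Int) :
    (solPopA p st v).1 = v + (solPopA p st 0).1 ∧ (solPopA p st v).2 = (solPopA p st 0).2 := by
  induction st generalizing v with
  | nil => simp [solPopA]
  | cons qc rest ih =>
    obtain ⟨q, c⟩ := qc
    simp only [solPopA]
    by_cases h : p > q
    · simp [h]
    · simp only [if_neg h]
      constructor
      · rw [(ih (v + c)).1, (ih (0 + c)).1]; ring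
      · rw [(ih (v + c)).2, (ih (0 + c)).2]

-- popping for a smaller pivot pops at least as far: split lemma
theorem solPopA_split (p p' : Int) (st : List (Int × Int)) (h : p' ≤ p) :
    (solPopA p' st 0).1 = (solPopA p st 0).1 + (solPopA p' (solPopA p st 0).2 0).1 := by
  induction st with
  | nil => simp [solPopA]
  | cons qc rest ih =>
    obtain ⟨q, c⟩ := qc
    by_cases hp : p > q
    · have h0 : solPopA p ((q, c) :: rest) 0 = (0, (q, c) :: rest) := by
        simp [solPopA, hp]
      rw [h0]
      simp
    · have hq : ¬ p' > q := by omega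
      simp only [solPopA, if_neg hp, if_neg hq]
      rw [(solPopA_val p' rest (0 + c)).1, (solPopA_val p rest (0 + c)).1,
          (solPopA_val p rest (0 + c)).2, ih]
      ring

-- the stack invariant: for every pivot, popped counters + 1 = B's count over the processed suffix
def InvA (st : List (Int × Int)) (s : List Int) : Prop :=
  ∀ p, (solPopA p st 0).1 + 1 = solCountB p s

theorem invA_step (st : List (Int × Int)) (s : List Int) (p : Int) (hInv : InvA st s) :
    InvA ((p, (solPopA p st 0).1 + 1) :: (solPopA p st 0).2) (p :: s) := by
  intro p'
  by_cases h : p' > p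
  · simp [solPopA, solCountB, h]
  · have h3 : p' ≤ p := by omega
    simp only [solPopA, solCountB, if_neg h]
    rw [(solPopA_val p' (solPopA p st 0).2 (0 + ((solPopA p st 0).1 + 1))).1]
    have hs := solPopA_split p p' st h3
    have hi := hInv p'
    omega

-- A's loop computes solNaive of (processed suffix prepended with the remaining reversed input)
theorem solLoopA_eq (rest : List Int) (st : List (Int × Int)) (ans s : List Int)
    (hInv : InvA st s) (hAns : ans = (solNaive s).reverse) :
    solLoopA rest st ans = solNaive (rest.reverse ++ s) := by
  induction rest generalizing st ans s with
  | nil => simp [solLoopA, hAns]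
  | cons p rs ih =>
    simp only [solLoopA]
    have hval : (solPopA p st 0).1 + 1 = solCountB p s := hInv p
    have := ih ((p, (solPopA p st 0).1 + 1) :: (solPopA p st 0).2)
      (ans ++ [(solPopA p st 0).1 + 1]) (p :: s) (invA_step st s p hInv)
      (by simp [solNaive, hAns, hval])
    simpa using this

theorem solution_eq_naive (prices : List Int) (h : prices ≠ []) :
    solution prices = solNaive prices := by
  have hrev : prices.reverse ≠ [] := by simpa using h
  obtain ⟨p0, rest, hr⟩ : ∃ p0 rest, prices.reverse = p0 :: rest := by
    cases hp : prices.reverse with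
    | nil => exact absurd hp hrev
    | cons a l => exact ⟨a, l, rfl⟩
  have h1 : solution prices = solLoopA rest [(p0, 0)] [0] := by
    unfold solution; rw [hr]
  have hInv : InvA [(p0, 0)] [p0] := by
    intro p
    by_cases hp : p > p0
    · simp [solPopA, solCountB, hp]
    · have h2 : ¬ p0 < p := by omega
      simp [solPopA, solCountB, h2]
  rw [h1, solLoopA_eq rest [(p0, 0)] [0] [p0] hInv (by simp [solNaive, solCountB])]
  have h2 : rest.reverse ++ [p0] = prices := by
    have := congrArg List.reverse hr
    simpa using this.symm
  rw [h2]

-- ===== VERDICT (by name: the statement is the Claim_ definition above) =====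
theorem solution_spec : Claim_equal_solution := by
  intro prices _ hpre
  unfold Spec_solution solution_alt
  rw [solution_eq_naive prices hpre, solLoopB_eq prices [] hpre]
  simp
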